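-- pv_equiv track=rewrite | github.com/jakob-bjorner/APR | src/eval/eval_apr.py | add_angle_brackets
-- ===== SOURCE A (Python) =====
-- def add_angle_brackets(text):
--     lines = text.split('\n')
--     result_lines = []
--     for line in lines:
--         if '>' in line and '<' not in line:
--             line = '<' + line
--         result_lines.append(line)
--     return '\n'.join(result_lines)
-- ===== SOURCE B (Python) =====
-- def add_angle_brackets(text):
--     # single reverse pass: stream characters from the end, tracking whether the
--     # current line has seen '>' / '<'; emit the '<' marker at each line start.
--     out = []
--     gt = lt = False
--     for ch in reversed(text):
--         if ch == '\n':
--             if gt and not lt: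
--                 out.append('<')
--             out.append('\n')
--             gt = lt = False
--         else:
--             if ch == '>':
--                 gt = True
--             elif ch == '<':
--                 lt = True
--             out.append(ch)
--     if gt and not lt:
--         out.append('<')
--     out.reverse()
--     return ''.join(out)
-- ===== Notes on version B (the rewrite author's own statement) =====
-- stated objective: alternative
-- what changed: Replaces the newline-split / per-line loop / join pipeline with a single reverse character pass that tracks two per-line boolean flags (bracket seen?) and streams the output, so no line list is ever built.
import Mathlib
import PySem

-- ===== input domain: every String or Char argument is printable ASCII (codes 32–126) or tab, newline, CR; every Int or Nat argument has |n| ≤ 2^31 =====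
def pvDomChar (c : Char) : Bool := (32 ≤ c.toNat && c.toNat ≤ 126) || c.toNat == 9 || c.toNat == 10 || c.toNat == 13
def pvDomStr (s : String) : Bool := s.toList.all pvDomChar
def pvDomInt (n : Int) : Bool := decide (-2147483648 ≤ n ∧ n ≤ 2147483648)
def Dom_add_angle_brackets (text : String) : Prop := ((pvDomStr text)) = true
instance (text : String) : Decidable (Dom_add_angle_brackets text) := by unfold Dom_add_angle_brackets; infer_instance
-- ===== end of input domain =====

-- B replaces A's split/loop/join with one reverse character pass carrying per-line flags; alternative decomposition, same asymptotic cost.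

-- ===== PORT A =====
def add_angle_brackets (text : String) : String :=
  let lines := PySem.Chars.splitOn text.toList ['\n']
  let result_lines := lines.foldl (fun acc line =>
    acc ++ [if PySem.Chars.isIn ['>'] line && !(PySem.Chars.isIn ['<'] line)
            then '<' :: line else line]) []
  String.ofList (PySem.Chars.join ['\n'] result_lines)

-- ===== PORT B =====
-- scan of Source B: consumes the reversed character list; `acc` is the (forward) output built so far
def addAngleGo : List Char → List Char → Bool → Bool → List Char
  | [], acc, gt, lt => if gt && !lt then '<' :: acc else acc
  | c :: rest, acc, gt, lt =>
    if c == '\n' then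
      addAngleGo rest ('\n' :: (if gt && !lt then '<' :: acc else acc)) false false
    else
      addAngleGo rest (c :: acc) (gt || c == '>') (lt || c == '<')

def add_angle_brackets_alt (text : String) : String :=
  String.ofList (addAngleGo text.toList.reverse [] false false)

-- ===== PRECONDITION & SPEC =====
def Spec_add_angle_brackets (text : String) (out : String) : Prop := out = add_angle_brackets_alt text
instance (text : String) (out : String) : Decidable (Spec_add_angle_brackets text out) := by unfold Spec_add_angle_brackets; infer_instance

-- ===== CLAIM (what is proved, stated in full; the proofs are below) =====
def Claim_equal_add_angle_brackets : Prop := ∀ (text : String), Dom_add_angle_brackets text → Spec_add_angle_brackets text (add_angle_brackets text)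

-- ===== LEMMAS AND PROOFS =====

def pvP : Char → Bool := fun c => c == '\n'
def pvF : List Char → List Char := fun line =>
  if line.contains '>' && !(line.contains '<') then '<' :: line else line

theorem pv_splitOnP_ne_nil (p : Char → Bool) (l : List Char) : List.splitOnP p l ≠ [] := by
  induction l with
  | nil => simp [List.splitOnP_nil]
  | cons c rest ih =>
      rw [List.splitOnP_cons]
      split_ifs
      · simp
      · cases h : List.splitOnP p rest with
        | nil => exact absurd h ih
        | cons a t => simp [h]

theorem pv_intercalate_cons_cons (a b : List Char) (t : List (List Char)) :
    ['\n'].intercalate (a :: b :: t) = a ++ '\n' :: ['\n'].intercalate (b :: t) := by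
  simp [List.intercalate]

theorem pv_intercalate_single (a : List Char) : ['\n'].intercalate [a] = a := by
  simp [List.intercalate]

theorem pv_go_spec (l : List Char) : ∀ (fuel : Nat), l.length < fuel → ∀ (cur : List Char) (acc : List (List Char)),
    PySem.Chars.splitOn.go ['\n'] fuel l cur acc
      = acc.reverse ++ List.modifyHead (cur.reverse ++ ·) (List.splitOnP pvP l) := by
  induction l with
  | nil =>
      intro fuel hf cur acc
      cases fuel with
      | zero => omega
      | succ f => simp [PySem.Chars.splitOn.go, List.splitOnP_nil]
  | cons c rest ih =>
      intro fuel hf cur acc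
      cases fuel with
      | zero => omega
      | succ f =>
        have hrest : rest.length < f := by simpa using hf
        rw [List.splitOnP_cons]
        by_cases hc : c = '\n'
        · subst hc
          simp only [PySem.Chars.splitOn.go]
          rw [if_pos (by simp [List.isPrefixOf])]
          rw [show List.drop (['\n'] : List Char).length ('\n' :: rest) = rest from rfl,
            ih f hrest [] (cur.reverse :: acc)]
          rw [if_pos (by simp [pvP])]
          cases hsp : List.splitOnP pvP rest with
          | nil => exact absurd hsp (pv_splitOnP_ne_nil _ _)
          | cons a t => simp [List.modifyHead]
        · have hpre : List.isPrefixOf ['\n'] (c :: rest) = false := by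
            simp [List.isPrefixOf]; exact fun h => absurd h.symm hc
          simp only [PySem.Chars.splitOn.go, hpre]
          rw [if_neg (by simp [hpre]), ih f hrest (c :: cur) acc]
          have hP : pvP c = false := by simp [pvP, hc]
          rw [hP]
          simp only [Bool.false_eq_true, if_false]
          congr 1
          cases h : List.splitOnP pvP rest with
          | nil => exact absurd h (pv_splitOnP_ne_nil _ _)
          | cons a t => simp [List.modifyHead]

theorem pv_splitOn_eq (cs : List Char) :
    PySem.Chars.splitOn cs ['\n'] = List.splitOnP pvP cs := by
  unfold PySem.Chars.splitOn
  rw [pv_go_spec cs (cs.length + 1) (by omega) [] []]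
  cases hsp : List.splitOnP pvP cs with
  | nil => exact absurd hsp (pv_splitOnP_ne_nil _ _)
  | cons a t => simp [List.modifyHead]

theorem pv_splitOnP_single (cur : List Char) (h : '\n' ∉ cur) :
    List.splitOnP pvP cur = [cur] := by
  induction cur with
  | nil => simp [List.splitOnP_nil]
  | cons c rest ih =>
      have hc : c ≠ '\n' := fun hh => h (hh ▸ List.mem_cons_self ..)
      rw [List.splitOnP_cons, if_neg (by simp [pvP, hc]),
        ih (fun hm => h (List.mem_cons_of_mem _ hm))]
      rfl

theorem pv_splitOnP_append (s cur : List Char) (h : '\n' ∉ cur) :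
    List.splitOnP pvP (s ++ '\n' :: cur) = List.splitOnP pvP s ++ [cur] := by
  induction s with
  | nil => simp [List.splitOnP_cons, pvP, pv_splitOnP_single cur h]
  | cons c rest ih =>
      rw [List.cons_append, List.splitOnP_cons, List.splitOnP_cons, ih]
      by_cases hc : pvP c = true
      · simp [hc]
      · rw [if_neg hc, if_neg hc]
        cases hsp : List.splitOnP pvP rest with
        | nil => exact absurd hsp (pv_splitOnP_ne_nil _ _)
        | cons a t => simp [hsp, List.modifyHead]

theorem pv_intercalate_snoc (L : List (List Char)) (x : List Char) (h : L ≠ []) :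
    ['\n'].intercalate (L ++ [x]) = ['\n'].intercalate L ++ '\n' :: x := by
  induction L with
  | nil => exact absurd rfl h
  | cons a t ih =>
      cases t with
      | nil => simp [List.intercalate]
      | cons b u =>
          rw [show (a :: b :: u) ++ [x] = a :: b :: (u ++ [x]) from by simp,
            pv_intercalate_cons_cons,
            show b :: (u ++ [x]) = (b :: u) ++ [x] from by simp,
            ih (by simp), pv_intercalate_cons_cons]
          simp

theorem pv_foldl_map (lines : List (List Char)) : ∀ acc,
    lines.foldl (fun acc line =>
      acc ++ [if PySem.Chars.isIn ['>'] line && !(PySem.Chars.isIn ['<'] line)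
              then '<' :: line else line]) acc = acc ++ lines.map pvF := by
  induction lines with
  | nil => simp
  | cons a t ih =>
      intro acc
      rw [List.foldl_cons, ih]
      have h1 : ∀ (c : Char) (l : List Char), PySem.Chars.isIn [c] l = l.contains c := by
        intro c l
        rw [Bool.eq_iff_iff, PySem.Chars.isIn_iff_infix, List.contains_iff_mem]
        constructor
        · intro hin; exact hin.mem (by simp)
        · intro hm
          obtain ⟨s, t, rfl⟩ := List.mem_iff_append.mp hm
          exact ⟨s, t, by simp⟩
      simp [pvF, h1]

theorem pv_bgo_spec (rcs : List Char) : ∀ (cur rest : List Char), '\n' ∉ cur →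
    addAngleGo rcs (cur ++ rest) (cur.contains '>') (cur.contains '<')
      = ['\n'].intercalate ((List.splitOnP pvP (rcs.reverse ++ cur)).map pvF) ++ rest := by
  induction rcs with
  | nil =>
      intro cur rest h
      rw [show ([] : List Char).reverse ++ cur = cur from by simp, pv_splitOnP_single cur h]
      rw [List.map_singleton, pv_intercalate_single]
      simp only [addAngleGo, pvF]
      split_ifs with hco <;> simp
  | cons c r ih =>
      intro cur rest h
      by_cases hc : c = '\n'
      · subst hc
        simp only [addAngleGo]
        rw [if_pos (by decide)]
        have hih := ih [] ('\n' :: (pvF cur ++ rest)) (by simp)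
        simp only [List.contains_nil, List.nil_append] at hih
        rw [show ('\n' :: (if cur.contains '>' && !cur.contains '<' then '<' :: (cur ++ rest)
              else cur ++ rest)) = '\n' :: (pvF cur ++ rest) from by
            simp only [pvF]
            split_ifs <;> simp]
        rw [hih]
        rw [show ('\n' :: r).reverse ++ cur = r.reverse ++ '\n' :: cur from by simp,
          pv_splitOnP_append _ _ h, List.map_append, List.map_singleton,
          pv_intercalate_snoc _ _ (by
            intro hnil
            have hne := pv_splitOnP_ne_nil pvP r.reverse
            simp only [List.map_eq_nil_iff] at hnil
            exact hne hnil)]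
        simp
      · simp only [addAngleGo]
        rw [if_neg (by simp only [beq_iff_eq]; exact hc)]
        have hcons : (c :: cur).contains '>' = (cur.contains '>' || c == '>') := by
          by_cases hg : c = '>'
          · simp [hg, Bool.or_comm]
          · have h1 : (c == '>') = false := by simp [hg]
            have h2 : ('>' = c) = False := eq_false (fun hh => hg (Eq.symm hh))
            simp [h1, h2]
        have hcons2 : (c :: cur).contains '<' = (cur.contains '<' || c == '<') := by
          by_cases hg : c = '<'
          · simp [hg, Bool.or_comm]
          · have h1 : (c == '<') = false := by simp [hg]
            have h2 : ('<' = c) = False := eq_false (fun hh => hg (Eq.symm hh))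
            simp [h1, h2]
        have := ih (c :: cur) rest (by
          intro hm
          rcases List.mem_cons.mp hm with h1 | h2
          · exact hc h1.symm
          · exact h h2)
        rw [List.cons_append] at this
        rw [← hcons, ← hcons2, this]
        congr 3
        simp

-- ===== VERDICT (by name: the statement is the Claim_ definition above) =====
theorem add_angle_brackets_spec : Claim_equal_add_angle_brackets := by
  intro text _
  unfold Spec_add_angle_brackets add_angle_brackets add_angle_brackets_alt
  have hb := pv_bgo_spec text.toList.reverse [] [] (by simp)
  simp only [List.contains_nil, List.append_nil, List.reverse_reverse] at hb
  rw [hb, pv_splitOn_eq]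
  simp only [pv_foldl_map, PySem.Chars.join]
  simp
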